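-- pv_equiv track=rewrite | github.com/HettyPatel/trawl-uq | experiments/26_error_propagation.py | get_first_chunk_by_importance
-- ===== SOURCE A (Python) =====
-- def get_first_chunk_by_importance(importance_data, layer_idx, label):
--     """Find the first chunk index with the given importance label for a layer."""
--     if layer_idx not in importance_data:
--         return None
--     chunks = importance_data[layer_idx]
--     matching = [ci for ci, info in chunks.items() if info['importance'] == label]
--     if not matching:
--         return None
--     return min(matching)
-- ===== SOURCE B (Python) =====
-- def get_first_chunk_by_importance(importance_data, layer_idx, label):
--     """Find the first chunk index with the given importance label for a layer."""
--     chunks = importance_data.get(layer_idx)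
--     if chunks is None:
--         return None
--     for ci in sorted(chunks):
--         if chunks[ci]['importance'] == label:
--             return ci
--     return None
-- ===== Notes on version B (the rewrite author's own statement) =====
-- stated objective: alternative
-- what changed: Replaced the filter-all-then-min two-phase computation with a sort of the chunk keys followed by an early-return scan for the first matching key.
import Mathlib
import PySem

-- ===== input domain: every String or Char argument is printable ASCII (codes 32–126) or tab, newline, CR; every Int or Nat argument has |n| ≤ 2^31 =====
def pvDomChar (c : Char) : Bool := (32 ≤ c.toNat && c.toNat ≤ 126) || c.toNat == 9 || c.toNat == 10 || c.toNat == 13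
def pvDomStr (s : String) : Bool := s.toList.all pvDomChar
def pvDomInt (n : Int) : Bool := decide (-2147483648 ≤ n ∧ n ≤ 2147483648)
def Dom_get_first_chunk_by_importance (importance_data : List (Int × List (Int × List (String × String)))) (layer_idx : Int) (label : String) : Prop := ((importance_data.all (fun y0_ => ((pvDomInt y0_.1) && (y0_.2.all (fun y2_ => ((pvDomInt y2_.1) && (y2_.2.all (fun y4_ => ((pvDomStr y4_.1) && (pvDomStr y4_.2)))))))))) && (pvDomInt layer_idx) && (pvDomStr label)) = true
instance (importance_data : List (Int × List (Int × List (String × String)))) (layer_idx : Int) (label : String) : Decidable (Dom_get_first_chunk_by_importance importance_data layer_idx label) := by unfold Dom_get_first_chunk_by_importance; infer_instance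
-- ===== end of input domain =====

-- ===== PORT A =====
-- B replaces A's filter-then-min over the chunk items with a sort of the keys plus a
-- first-match scan; equal return values proved on Pre_ (where A raises no KeyError).
def get_first_chunk_by_importance (importance_data : List (Int × List (Int × List (String × String)))) (layer_idx : Int) (label : String) : Option Int :=
  let d := PySem.Dict.ofList importance_data
  if !(d.contains layer_idx) then none
  else
    let chunks := PySem.Dict.ofList (d.getD layer_idx [])
    let matching := chunks.items.filterMap (fun p =>
      if ((PySem.Dict.ofList p.2).get? "importance" == some label) then some p.1 else none)
    if matching.isEmpty then none
    else PySem.List.min? matching (fun x => x)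

-- ===== PORT B =====
-- the early-return for-loop of Source B over the sorted keys
def pvFirstMatch (cd : PySem.Dict Int (List (String × String))) (label : String) : List Int → Option Int
  | [] => none
  | ci :: rest =>
    if ((PySem.Dict.ofList (cd.getD ci [])).get? "importance" == some label) then some ci
    else pvFirstMatch cd label rest

def get_first_chunk_by_importance_alt (importance_data : List (Int × List (Int × List (String × String)))) (layer_idx : Int) (label : String) : Option Int :=
  match (PySem.Dict.ofList importance_data).get? layer_idx with
  | none => none
  | some chunkList =>
    let cd := PySem.Dict.ofList chunkList
    pvFirstMatch cd label (PySem.List.sorted cd.keys (fun x => x) false)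

-- ===== PRECONDITION & SPEC =====
-- Pre_ excludes exactly the inputs on which A raises KeyError: a chunk info dict of the
-- selected layer that lacks the "importance" key.
def Pre_get_first_chunk_by_importance (importance_data : List (Int × List (Int × List (String × String)))) (layer_idx : Int) (label : String) : Prop :=
  (((PySem.Dict.ofList importance_data).get? layer_idx).all (fun c =>
    (PySem.Dict.ofList c).items.all (fun p => (PySem.Dict.ofList p.2).contains "importance"))) = true
instance (importance_data : List (Int × List (Int × List (String × String)))) (layer_idx : Int) (label : String) : Decidable (Pre_get_first_chunk_by_importance importance_data layer_idx label) := by unfold Pre_get_first_chunk_by_importance; infer_instance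

def pvWitness_get_first_chunk_by_importance : (List (Int × List (Int × List (String × String)))) × Int × String :=
  ([(0, [(2, [("importance", "hi")]), (1, [("importance", "lo")])])], 0, "hi")

def Spec_get_first_chunk_by_importance (importance_data : List (Int × List (Int × List (String × String)))) (layer_idx : Int) (label : String) (out : Option Int) : Prop := out = get_first_chunk_by_importance_alt importance_data layer_idx label
instance (importance_data : List (Int × List (Int × List (String × String)))) (layer_idx : Int) (label : String) (out : Option Int) : Decidable (Spec_get_first_chunk_by_importance importance_data layer_idx label out) := by unfold Spec_get_first_chunk_by_importance; infer_instance

-- ===== CLAIM (what is proved, stated in full; the proofs are below) =====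
def Claim_equal_get_first_chunk_by_importance : Prop := ∀ (importance_data : List (Int × List (Int × List (String × String)))) (layer_idx : Int) (label : String), Dom_get_first_chunk_by_importance importance_data layer_idx label → Pre_get_first_chunk_by_importance importance_data layer_idx label → Spec_get_first_chunk_by_importance importance_data layer_idx label (get_first_chunk_by_importance importance_data layer_idx label)

-- ===== LEMMAS AND PROOFS =====

-- the for-loop of Source B is a first-match search
theorem pvFirstMatch_eq_find? (cd : PySem.Dict Int (List (String × String))) (label : String) (l : List Int) :
    pvFirstMatch cd label l = l.find? (fun ci => (PySem.Dict.ofList (cd.getD ci [])).get? "importance" == some label) := by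
  induction l with
  | nil => rfl
  | cons ci rest ih =>
    simp only [pvFirstMatch, List.find?]
    split_ifs with h
    · simp [h]
    · simp only [Bool.not_eq_true] at h
      simp [h, ih]

-- A's 'matching' list equals a filter of the keys, given that getD recovers each item's value
theorem pvFilterMap_eq_filter_map_fst (cd : PySem.Dict Int (List (String × String))) (label : String)
    (l : List (Int × List (String × String))) (h : ∀ p ∈ l, cd.getD p.1 [] = p.2) :
    l.filterMap (fun p =>
      if ((PySem.Dict.ofList p.2).get? "importance" == some label) then some p.1 else none)
    = ((l.map Prod.fst).filter (fun ci => (PySem.Dict.ofList (cd.getD ci [])).get? "importance" == some label)) := by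
  induction l with
  | nil => rfl
  | cons p rest ih =>
    have hp : cd.getD p.1 [] = p.2 := h p (by simp)
    have hrest := ih (fun q hq => h q (by simp [hq]))
    simp only [List.filterMap_cons, List.map_cons, List.filter_cons, hp, hrest]
    cases hc : ((PySem.Dict.ofList p.2).get? "importance" == some label)
    · simp
    · simp

-- min (no key) of a list equals the head of a strictly increasing rearrangement
theorem pvMin?_eq_head? (xs ys : List Int) (hp : ys.Perm xs) (hs : ys.Pairwise (· < ·)) :
    PySem.List.min? xs (fun x => x) = ys.head? := by
  cases ys with
  | nil =>
    have hx : xs = [] := hp.symm.eq_nil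
    subst hx
    simp [PySem.List.min?_eq_none_iff]
  | cons m t =>
    have hm : m ∈ xs := hp.mem_iff.mp (by simp)
    obtain ⟨m', hm'⟩ : ∃ m', PySem.List.min? xs (fun x => x) = some m' := by
      cases h : PySem.List.min? xs (fun x => x) with
      | none =>
        rw [PySem.List.min?_eq_none_iff] at h
        subst h; cases hm
      | some v => exact ⟨v, rfl⟩
    have hle : m' ≤ m := PySem.List.min?_isMin hm' m hm
    have hm'mem : m' ∈ m :: t := hp.mem_iff.mpr (PySem.List.min?_mem hm')
    rcases List.mem_cons.mp hm'mem with he | ht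
    · simp [hm', he]
    · have : m < m' := (List.pairwise_cons.mp hs).1 m' ht
      omega

-- ===== VERDICT (by name: the statement is the Claim_ definition above) =====
theorem get_first_chunk_by_importance_spec : Claim_equal_get_first_chunk_by_importance := by
  intro importance_data layer_idx label _ _
  unfold Spec_get_first_chunk_by_importance
  unfold get_first_chunk_by_importance get_first_chunk_by_importance_alt
  cases hget : (PySem.Dict.ofList importance_data).get? layer_idx with
  | none =>
    simp [PySem.Dict.contains_eq_isSome_get?, hget]
  | some c =>
    simp only [PySem.Dict.contains_eq_isSome_get?, hget, Option.isSome_some, Bool.not_true,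
      Bool.false_eq_true, if_false]
    rw [PySem.Dict.getD_of_get?_eq_some _ _ hget]
    set cd := PySem.Dict.ofList c with hcd
    set P : Int → Bool := fun ci => (PySem.Dict.ofList (cd.getD ci [])).get? "importance" == some label with hP
    have hnodup : cd.keys.Nodup := PySem.Dict.nodup_keys_ofList c
    have hmatch : cd.items.filterMap (fun p =>
        if ((PySem.Dict.ofList p.2).get? "importance" == some label) then some p.1 else none)
        = cd.keys.filter P := by
      have := pvFilterMap_eq_filter_map_fst cd label cd.items
        (fun p hp => PySem.Dict.getD_of_mem_items cd hp hnodup [])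
      simpa using this
    rw [hmatch, pvFirstMatch_eq_find?, ← List.head?_filter]
    -- the sorted keys are strictly increasing
    have hsortnd : (PySem.List.sorted cd.keys (fun x => x) false).Nodup :=
      (PySem.List.sorted_perm cd.keys (fun x => x) false).nodup_iff.mpr hnodup
    have hsortlt : (PySem.List.sorted cd.keys (fun x => x) false).Pairwise (· < ·) := by
      have h1 := PySem.List.sorted_pairwise cd.keys (fun x => x)
      have := h1.and hsortnd
      exact this.imp (fun h => lt_of_le_of_ne h.1 h.2)
    have hperm : ((PySem.List.sorted cd.keys (fun x => x) false).filter P).Perm (cd.keys.filter P) :=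
      (PySem.List.sorted_perm cd.keys (fun x => x) false).filter P
    by_cases hemp : cd.keys.filter P = []
    · have hnil : (PySem.List.sorted cd.keys (fun x => x) false).filter P = [] := by
        rw [hemp] at hperm
        exact hperm.eq_nil
      rw [← hP, hnil, hemp]
      simp
    · have hne : (cd.keys.filter P).isEmpty = false := by
        simpa [List.isEmpty_iff] using hemp
      rw [← hP, hne]
      simp only [Bool.false_eq_true, if_false]
      exact pvMin?_eq_head? _ _ hperm (hsortlt.filter P)
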